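-- pv_equiv track=rewrite | github.com/OliverSpacey/Data-Driven-Assignment-OCR | data driven assignment/system.py | checkDiagTL
-- ===== SOURCE A (Python) =====
-- def compare(string, array):
--     for i in range(len(string)):
--         if string[i] != array[i]:
--             return False
--     return True
--
-- def compareEstimate(string, array):
--     incorrect = 0
--     for i in range(len(string)):
--         if string[i] != array[i]:
--             incorrect += 1
--     if incorrect > 1:
--         return False
--     else:
--         return True
--
-- def checkDiagTL(array, word, i, j, height, width, estimate):
--     temp = []
--     if i-len(word)+1 > 0 and j-len(word)+1 > 0:
--         for x in range(len(word)):
--             temp.append(array[i-x][j-x])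
--         if (compare(word, temp) and not estimate) or (compareEstimate(word, temp) and estimate):
--             return True
--     return False
-- ===== SOURCE B (Python) =====
-- def checkDiagTL(array, word, i, j, height, width, estimate):
--     n = len(word)
--     if i - n + 1 <= 0 or j - n + 1 <= 0:
--         return False
--     mismatches = 0
--     for x in range(n):
--         if word[x] != array[i - x][j - x]:
--             if not estimate:
--                 return False
--             mismatches += 1
--     return mismatches <= 1
-- ===== Notes on version B (the rewrite author's own statement) =====
-- stated objective: simpler
-- what changed: B replaces A's temp-list construction plus two separate comparison helper functions with a single direct pass over the diagonal that compares word[x] to array[i-x][j-x] in place, early-exiting on the first mismatch when estimate is false and counting mismatches otherwise.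
import Mathlib
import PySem

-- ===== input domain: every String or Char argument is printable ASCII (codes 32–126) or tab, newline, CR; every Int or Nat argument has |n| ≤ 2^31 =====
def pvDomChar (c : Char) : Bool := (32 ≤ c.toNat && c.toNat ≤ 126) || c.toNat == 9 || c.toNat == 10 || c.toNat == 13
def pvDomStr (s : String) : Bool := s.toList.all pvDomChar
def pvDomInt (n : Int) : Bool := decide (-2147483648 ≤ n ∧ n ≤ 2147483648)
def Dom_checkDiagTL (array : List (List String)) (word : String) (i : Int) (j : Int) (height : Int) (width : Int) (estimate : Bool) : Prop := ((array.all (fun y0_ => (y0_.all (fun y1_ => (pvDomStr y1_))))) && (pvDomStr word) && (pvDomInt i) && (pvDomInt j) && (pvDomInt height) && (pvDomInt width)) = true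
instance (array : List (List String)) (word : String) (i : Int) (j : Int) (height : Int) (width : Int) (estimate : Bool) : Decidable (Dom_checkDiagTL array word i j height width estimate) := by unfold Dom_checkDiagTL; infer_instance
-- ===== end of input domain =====

-- B fuses A's build-a-temp-list-then-scan-with-two-helpers into one direct pass with a mismatch counter (objective: simpler).
-- the cell array[i-x][j-x] as Python evaluates it: none = IndexError
def cellTL (array : List (List String)) (i j x : Int) : Option String :=
  (PySem.List.pyGet? array (i - x)).bind (fun row => PySem.List.pyGet? row (j - x))

-- ===== PORT A =====
-- helper compare(string, array): loop over range(len(string))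
def pyCompareGo (s : String) (arr : List String) : List Int → Bool
  | [] => true
  | idx :: rest =>
    match PySem.Str.pyGet? s idx, PySem.List.pyGet? arr idx with
    | some c, some cell =>
      if String.singleton c ≠ cell then false else pyCompareGo s arr rest
    | _, _ => false   -- IndexError in Python; unreachable in checkDiagTL's use

def pyCompare (s : String) (arr : List String) : Bool :=
  pyCompareGo s arr (PySem.List.pyRange 0 (PySem.Str.len s) 1)

-- helper compareEstimate(string, array)
def pyCompareEstGo (s : String) (arr : List String) (incorrect : Int) : List Int → Bool
  | [] => if incorrect > 1 then false else true
  | idx :: rest =>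
    match PySem.Str.pyGet? s idx, PySem.List.pyGet? arr idx with
    | some c, some cell =>
      if String.singleton c ≠ cell then pyCompareEstGo s arr (incorrect + 1) rest
      else pyCompareEstGo s arr incorrect rest
    | _, _ => false   -- IndexError in Python; unreachable in checkDiagTL's use

def pyCompareEst (s : String) (arr : List String) : Bool :=
  pyCompareEstGo s arr 0 (PySem.List.pyRange 0 (PySem.Str.len s) 1)

-- the temp-building loop: for x in range(len(word)): temp.append(array[i-x][j-x])
def buildTempTL (array : List (List String)) (i j : Int) : List Int → Option (List String)
  | [] => some []
  | x :: xs =>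
    match cellTL array i j x with
    | none => none                      -- IndexError in Python; outside Pre_
    | some cell => (buildTempTL array i j xs).map (cell :: ·)

def checkDiagTL (array : List (List String)) (word : String) (i : Int) (j : Int) (height : Int) (width : Int) (estimate : Bool) : Bool :=
  let n : Int := PySem.Str.len word
  if i - n + 1 > 0 ∧ j - n + 1 > 0 then
    match buildTempTL array i j (PySem.List.pyRange 0 n 1) with
    | none => false                     -- IndexError in Python; outside Pre_
    | some temp =>
      if (pyCompare word temp && !estimate) || (pyCompareEst word temp && estimate) then true
      else false
  else false

-- ===== PORT B =====
-- single pass: compare word[x] with array[i-x][j-x] directly, counting mismatches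
def altGoTL (array : List (List String)) (word : String) (i j : Int) (estimate : Bool) (mismatches : Int) : List Int → Bool
  | [] => decide (mismatches ≤ 1)
  | x :: xs =>
    match PySem.Str.pyGet? word x, cellTL array i j x with
    | some c, some cell =>
      if String.singleton c ≠ cell then
        if !estimate then false
        else altGoTL array word i j estimate (mismatches + 1) xs
      else altGoTL array word i j estimate mismatches xs
    | _, _ => false                     -- IndexError in Python; outside Pre_

def checkDiagTL_alt (array : List (List String)) (word : String) (i : Int) (j : Int) (height : Int) (width : Int) (estimate : Bool) : Bool :=
  let n : Int := PySem.Str.len word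
  if i - n + 1 ≤ 0 ∨ j - n + 1 ≤ 0 then false
  else altGoTL array word i j estimate 0 (PySem.List.pyRange 0 n 1)

-- ===== PRECONDITION & SPEC =====
-- Pre_ excludes exactly the inputs where Python A raises IndexError: the guard holds but some
-- diagonal cell array[i-x][j-x] is out of range.
def Pre_checkDiagTL (array : List (List String)) (word : String) (i : Int) (j : Int) (height : Int) (width : Int) (estimate : Bool) : Prop :=
  (i - PySem.Str.len word + 1 > 0 ∧ j - PySem.Str.len word + 1 > 0) →
    ∀ x : Nat, x < word.toList.length → (cellTL array i j x).isSome
instance (array : List (List String)) (word : String) (i : Int) (j : Int) (height : Int) (width : Int) (estimate : Bool) : Decidable (Pre_checkDiagTL array word i j height width estimate) := by unfold Pre_checkDiagTL; infer_instance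

def pvWitness_checkDiagTL : List (List String) × String × Int × Int × Int × Int × Bool :=
  ([["a", "b"], ["c", "a"]], "a", 1, 1, 2, 2, false)

def Spec_checkDiagTL (array : List (List String)) (word : String) (i : Int) (j : Int) (height : Int) (width : Int) (estimate : Bool) (out : Bool) : Prop := out = checkDiagTL_alt array word i j height width estimate
instance (array : List (List String)) (word : String) (i : Int) (j : Int) (height : Int) (width : Int) (estimate : Bool) (out : Bool) : Decidable (Spec_checkDiagTL array word i j height width estimate out) := by unfold Spec_checkDiagTL; infer_instance

-- ===== CLAIM (what is proved, stated in full; the proofs are below) =====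
def Claim_equal_checkDiagTL : Prop := ∀ (array : List (List String)) (word : String) (i : Int) (j : Int) (height : Int) (width : Int) (estimate : Bool), Dom_checkDiagTL array word i j height width estimate → Pre_checkDiagTL array word i j height width estimate → Spec_checkDiagTL array word i j height width estimate (checkDiagTL array word i j height width estimate)

-- ===== LEMMAS AND PROOFS =====

-- if every cell on the diagonal exists, buildTempTL succeeds and temp records the cells in order
theorem buildTempTL_some (array : List (List String)) (i j : Int) :
    ∀ L : List Int, (∀ x ∈ L, (cellTL array i j x).isSome) →
      ∃ temp, buildTempTL array i j L = some temp ∧ temp.length = L.length ∧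
        ∀ k : Nat, (hk : k < L.length) → cellTL array i j (L[k]) = temp[k]? := by
  intro L
  induction L with
  | nil => intro _; exact ⟨[], rfl, rfl, fun k hk => absurd hk (by simp)⟩
  | cons x xs ih =>
    intro h
    have hx := h x (by simp)
    obtain ⟨c, hc⟩ := Option.isSome_iff_exists.mp hx
    obtain ⟨temp, ht, hlen, hidx⟩ := ih (fun y hy => h y (by simp [hy]))
    refine ⟨c :: temp, ?_, by simp [hlen], ?_⟩
    · simp [buildTempTL, hc, ht]
    · intro k hk
      cases k with
      | zero => simpa using hc
      | succ k => simpa using hidx k (by simpa using hk)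

-- estimate = False: A's compare over temp equals B's early-exit pass
theorem compare_eq_altGo (array : List (List String)) (word : String) (i j : Int) (temp : List String) :
    ∀ L : List Int, (∀ x ∈ L, PySem.List.pyGet? temp x = cellTL array i j x) →
      pyCompareGo word temp L = altGoTL array word i j false 0 L := by
  intro L
  induction L with
  | nil => intro _; simp [pyCompareGo, altGoTL]
  | cons x xs ih =>
    intro h
    have hx := h x (by simp)
    have ih' := ih (fun y hy => h y (by simp [hy]))
    simp only [pyCompareGo, altGoTL, hx]
    cases PySem.Str.pyGet? word x <;> cases cellTL array i j x <;> simp_all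

-- estimate = True: A's compareEstimate over temp equals B's counting pass, any accumulator
theorem compareEst_eq_altGo (array : List (List String)) (word : String) (i j : Int) (temp : List String) :
    ∀ (L : List Int) (m : Int), (∀ x ∈ L, PySem.List.pyGet? temp x = cellTL array i j x) →
      pyCompareEstGo word temp m L = altGoTL array word i j true m L := by
  intro L
  induction L with
  | nil =>
    intro m _
    simp only [pyCompareEstGo, altGoTL]
    by_cases h : m ≤ 1 <;> simp [h] <;> omega
  | cons x xs ih =>
    intro m h
    have hx := h x (by simp)
    have ih' := fun m' => ih m' (fun y hy => h y (by simp [hy]))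
    simp only [pyCompareEstGo, altGoTL, hx]
    cases PySem.Str.pyGet? word x <;> cases cellTL array i j x <;> simp_all

-- ===== VERDICT (by name: the statement is the Claim_ definition above) =====
theorem checkDiagTL_spec : Claim_equal_checkDiagTL := by
  intro array word i j height width estimate _ hpre
  unfold Spec_checkDiagTL checkDiagTL checkDiagTL_alt
  simp only []
  by_cases hg : i - PySem.Str.len word + 1 > 0 ∧ j - PySem.Str.len word + 1 > 0
  · rw [if_pos hg, if_neg (by omega)]
    have hcells := hpre hg
    have hnword : PySem.Str.len word = (word.toList.length : Int) := by
      simp [PySem.Str.len]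
    have hmem : ∀ x ∈ PySem.List.pyRange 0 (PySem.Str.len word) 1, (cellTL array i j x).isSome := by
      intro x hx
      rw [PySem.List.mem_pyRange_one] at hx
      have hx0 : x = ((x.toNat : Nat) : Int) := by omega
      rw [hx0]
      exact hcells x.toNat (by omega)
    obtain ⟨temp, htemp, hlen, hidx⟩ := buildTempTL_some array i j _ hmem
    rw [htemp]
    have hcorr : ∀ x ∈ PySem.List.pyRange 0 (PySem.Str.len word) 1, PySem.List.pyGet? temp x = cellTL array i j x := by
      intro x hx
      have hx' := PySem.List.mem_pyRange_one.mp hx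
      have hk : x.toNat < (PySem.List.pyRange 0 (PySem.Str.len word) 1).length := by
        rw [PySem.List.length_pyRange_one]; omega
      have hxk : x = ((x.toNat : Nat) : Int) := by omega
      have hget := hidx x.toNat hk
      rw [PySem.List.getElem_pyRange_one] at hget
      have hxx : (0 : Int) + (x.toNat : Int) = x := by omega
      rw [hxx] at hget
      have hpg : PySem.List.pyGet? temp x = temp[x.toNat]? := by
        rw [hxk, PySem.List.pyGet?_natCast, Int.toNat_natCast]
      rw [hpg]
      exact hget.symm
    cases estimate with
    | false =>
      have hcg := compare_eq_altGo array word i j temp _ hcorr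
      rw [← hcg]
      simp only [pyCompare, Bool.not_false, Bool.and_true, Bool.and_false, Bool.or_false]
      split <;> simp_all
    | true =>
      have hcg := compareEst_eq_altGo array word i j temp _ 0 hcorr
      rw [← hcg]
      simp only [pyCompareEst, Bool.not_true, Bool.and_false, Bool.false_or, Bool.and_true]
      split <;> simp_all
  · rw [if_neg hg, if_pos (by omega)]
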